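-- pv_equiv track=rewrite | github.com/pypi-data/pypi-mirror-6 | packages/mamaslemonpy/mamaslemonpy-0.95.zip/mamaslemonpy-0.95/mamaslemonpy/qgramshapes.py | min_matching_positions
-- ===== SOURCE A (Python) =====
-- def min_matching_positions(q, dontcares, occmax):  # (mmax, k)
--     """
--     Let a shape be given by (q, dontcares).
--     Return a list "results", such that results[r], r = 0, 1, ..., occmax,
--     is the minimum number of matching positions when
--     the shape matches r times in a window of length up to mmax with k errors,
--     """
--     cares = [i for i in range(q) if i not in dontcares]
--     bestresults = [r*len(cares) for r in range(occmax+1)]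
--     if occmax == 0:  return bestresults
--     # evaluate up to occmax overlapping shifts recursively
--     def _enumerate_matchpos(matches, occs, lastshift):
--         result = len(matches)    # number of matches
--         if result < bestresults[occs]:
--             bestresults[occs] = result
--         if occs >= occmax: return
--         if result >= bestresults[occs+1]:  return
--         for shift in range(lastshift+1, lastshift+q):
--             newmatches = sorted(set(matches + [(c + shift) for c in cares]))
--             _enumerate_matchpos(newmatches, occs+1, shift)
--     # call the defined recursive function to update bestresults
--     _enumerate_matchpos(cares, 1, 0)
--     return bestresults
-- ===== SOURCE B (Python) =====
-- def min_matching_positions(q, dontcares, occmax):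
--     cares = [i for i in range(q) if i not in dontcares]
--     bestresults = [r * len(cares) for r in range(occmax + 1)]
--     if occmax == 0:
--         return bestresults
--     # explicit DFS with a LIFO stack of frames (matches, occs, lastshift);
--     # shifts are pushed in decreasing order so the smallest shift is popped
--     # first, preserving the pre-order traversal that drives the pruning bounds
--     stack = [(cares, 1, 0)]
--     while stack:
--         matches, occs, lastshift = stack.pop()
--         result = len(matches)
--         if result < bestresults[occs]:
--             bestresults[occs] = result
--         if occs >= occmax:
--             continue
--         if result >= bestresults[occs + 1]:
--             continue
--         for shift in range(lastshift + q - 1, lastshift, -1):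
--             newmatches = sorted(set(matches + [c + shift for c in cares]))
--             stack.append((newmatches, occs + 1, shift))
--     return bestresults
-- ===== Notes on version B (the rewrite author's own statement) =====
-- stated objective: alternative
-- what changed: The nested recursive _enumerate_matchpos is replaced by an iterative DFS over an explicit LIFO stack of frames (matches, occs, lastshift); children are pushed in decreasing shift order so the pop order reproduces the original pre-order traversal and hence the same evolution of the shared pruning table bestresults.
-- outside the precondition, e.g. on min_matching_positions(3, [1], -1): A raises IndexError, B raises IndexError
import Mathlib
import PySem

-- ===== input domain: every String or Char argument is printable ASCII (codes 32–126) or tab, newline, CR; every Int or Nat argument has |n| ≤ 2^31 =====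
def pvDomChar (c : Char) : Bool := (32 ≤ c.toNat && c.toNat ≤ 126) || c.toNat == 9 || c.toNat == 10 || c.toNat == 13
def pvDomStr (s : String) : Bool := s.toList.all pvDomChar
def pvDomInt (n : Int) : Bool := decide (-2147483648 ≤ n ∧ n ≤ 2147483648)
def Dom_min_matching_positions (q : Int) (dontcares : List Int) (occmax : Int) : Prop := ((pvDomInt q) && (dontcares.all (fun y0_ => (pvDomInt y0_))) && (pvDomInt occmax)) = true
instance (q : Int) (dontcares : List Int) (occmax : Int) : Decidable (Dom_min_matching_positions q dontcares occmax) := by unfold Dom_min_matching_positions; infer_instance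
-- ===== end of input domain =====

-- B replaces the nested recursion of A by an iterative DFS over an explicit LIFO
-- stack of frames, pushing children in decreasing shift order so the traversal
-- (and hence the shared pruning table) evolves identically; objective: alternative.


-- ===== PORT A =====
-- cares = cares comprehension
def pvCares (q : Int) (dontcares : List Int) : List Int :=
  (PySem.List.pyRange 0 q 1).filter (fun i => !(dontcares.contains i))

-- newmatches = sorted(set(ms + [(c + shift) for c in cares]))
def pvNewMatches (cares ms : List Int) (shift : Int) : List Int :=
  PySem.List.sorted (PySem.Set.ofList (ms ++ cares.map (fun c => c + shift)))
    (fun x => x) false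

-- the inner recursive function _enumerate_matchpos; the mutable bestresults is
-- threaded through and returned.  Indexing bestresults[occs] is pyGetD/pySetD
-- (exact under Pre_, where every access is in range).
def pvEnumA (q : Int) (occmax : Int) (cares : List Int)
    (ms : List Int) (occs : Int) (lastshift : Int) (best : List Int) : List Int :=
  let result : Int := ms.length
  let best1 := if result < PySem.List.pyGetD best occs 0
               then PySem.List.pySetD best occs result else best
  if occmax ≤ occs then best1
  else if PySem.List.pyGetD best1 (occs + 1) 0 ≤ result then best1
  else
    (PySem.List.pyRange (lastshift + 1) (lastshift + q) 1).foldl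
      (fun b shift =>
        pvEnumA q occmax cares (pvNewMatches cares ms shift) (occs + 1) shift b)
      best1
termination_by (occmax - occs).toNat
decreasing_by omega

def min_matching_positions (q : Int) (dontcares : List Int) (occmax : Int) : List Int :=
  let cares := pvCares q dontcares
  let bestresults := (PySem.List.pyRange 0 (occmax + 1) 1).map (fun r => r * (cares.length : Int))
  if occmax = 0 then bestresults
  else pvEnumA q occmax cares cares 1 0 bestresults

-- ===== PORT B =====
-- weight of a stack frame, used only as the termination measure of the loop
def pvFrameW (q : Int) (occmax : Int) (f : List Int × Int × Int) : Nat :=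
  (q.toNat + 2) ^ ((occmax - f.2.1).toNat)

def pvStackW (q : Int) (occmax : Int) (stack : List (List Int × Int × Int)) : Nat :=
  (stack.map (pvFrameW q occmax)).sum

theorem pvStackW_push (q occmax : Int) (l : List Int) (g : Int → List Int × Int × Int)
    (W : Nat) (hW : ∀ x, pvFrameW q occmax (g x) = W) :
    ∀ st, pvStackW q occmax (l.foldl (fun st x => g x :: st) st)
      = l.length * W + pvStackW q occmax st := by
  induction l with
  | nil => intro st; simp
  | cons a t ih =>
      intro st
      simp only [List.foldl_cons, List.length_cons, ih]
      simp [pvStackW, hW a]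
      ring

-- the while-loop of B: pop a frame from the head, push children shifts in
-- decreasing order (range(lastshift+q-1, lastshift, -1)) so the smallest shift
-- is on top, exactly as Source B does with list.pop().
def pvLoopB (q : Int) (occmax : Int) (cares : List Int)
    (stack : List (List Int × Int × Int)) (best : List Int) : List Int :=
  match stack with
  | [] => best
  | (ms, occs, lastshift) :: rest =>
    let result : Int := ms.length
    let best1 := if result < PySem.List.pyGetD best occs 0
                 then PySem.List.pySetD best occs result else best
    if occmax ≤ occs then pvLoopB q occmax cares rest best1
    else if PySem.List.pyGetD best1 (occs + 1) 0 ≤ result then pvLoopB q occmax cares rest best1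
    else
      pvLoopB q occmax cares
        ((PySem.List.pyRange (lastshift + q - 1) lastshift (-1)).foldl
          (fun st shift => (pvNewMatches cares ms shift, occs + 1, shift) :: st) rest)
        best1
termination_by pvStackW q occmax stack
decreasing_by
  · simp [pvStackW, pvFrameW]
  · simp [pvStackW, pvFrameW]
  · rw [pvStackW_push q occmax _ _ ((q.toNat + 2) ^ ((occmax - (occs+1)).toNat))
        (fun x => rfl)]
    have hq : (PySem.List.pyRange (lastshift + q - 1) lastshift (-1)).length ≤ q.toNat + 1 := by
      simp [PySem.List.length_pyRange_neg_one]; omega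
    have hr : (occmax - occs).toNat = (occmax - (occs+1)).toNat + 1 := by omega
    have hpos : 0 < (q.toNat + 2) ^ ((occmax - (occs+1)).toNat) := by positivity
    have hkey : (PySem.List.pyRange (lastshift + q - 1) lastshift (-1)).length *
        (q.toNat + 2) ^ ((occmax - (occs+1)).toNat) < (q.toNat + 2) ^ ((occmax - occs).toNat) := by
      rw [hr, pow_succ]
      calc (PySem.List.pyRange (lastshift + q - 1) lastshift (-1)).length *
              (q.toNat + 2) ^ ((occmax - (occs+1)).toNat)
          ≤ (q.toNat + 1) * (q.toNat + 2) ^ ((occmax - (occs+1)).toNat) :=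
            Nat.mul_le_mul_right _ hq
        _ < (q.toNat + 2) * (q.toNat + 2) ^ ((occmax - (occs+1)).toNat) :=
            (Nat.mul_lt_mul_right hpos).mpr (by omega)
        _ = (q.toNat + 2) ^ ((occmax - (occs+1)).toNat) * (q.toNat + 2) := by ring
    simp only [pvStackW, pvFrameW, List.map_cons, List.sum_cons] at hkey ⊢
    omega

def min_matching_positions_alt (q : Int) (dontcares : List Int) (occmax : Int) : List Int :=
  let cares := pvCares q dontcares
  let bestresults := (PySem.List.pyRange 0 (occmax + 1) 1).map (fun r => r * (cares.length : Int))
  if occmax = 0 then bestresults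
  else pvLoopB q occmax cares [(cares, 1, 0)] bestresults

-- ===== PRECONDITION & SPEC =====
-- A raises IndexError when occmax < 0 (bestresults is empty but index 1 is read)
def Pre_min_matching_positions (q : Int) (dontcares : List Int) (occmax : Int) : Prop :=
  0 ≤ occmax
instance (q : Int) (dontcares : List Int) (occmax : Int) : Decidable (Pre_min_matching_positions q dontcares occmax) := by unfold Pre_min_matching_positions; infer_instance
def pvWitness_min_matching_positions : Int × List Int × Int := (3, [1], 2)

def Spec_min_matching_positions (q : Int) (dontcares : List Int) (occmax : Int) (out : List Int) : Prop := out = min_matching_positions_alt q dontcares occmax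
instance (q : Int) (dontcares : List Int) (occmax : Int) (out : List Int) : Decidable (Spec_min_matching_positions q dontcares occmax out) := by unfold Spec_min_matching_positions; infer_instance

-- ===== CLAIM (what is proved, stated in full; the proofs are below) =====
def Claim_equal_min_matching_positions : Prop := ∀ (q : Int) (dontcares : List Int) (occmax : Int), Dom_min_matching_positions q dontcares occmax → Pre_min_matching_positions q dontcares occmax → Spec_min_matching_positions q dontcares occmax (min_matching_positions q dontcares occmax)

-- ===== LEMMAS AND PROOFS =====

-- popping one frame and running the loop = recursively evaluating that frame,
-- then running the loop on the rest of the stack with the updated table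
theorem pvLoop_eq_enum (q : Int) (occmax : Int) (cares : List Int) :
    ∀ (r : Nat) (ms : List Int) (occs lastshift : Int)
      (rest : List (List Int × Int × Int)) (best : List Int),
      (occmax - occs).toNat ≤ r →
      pvLoopB q occmax cares ((ms, occs, lastshift) :: rest) best
        = pvLoopB q occmax cares rest (pvEnumA q occmax cares ms occs lastshift best) := by
  intro r
  induction r with
  | zero =>
      intro ms occs lastshift rest best hr
      rw [pvLoopB.eq_def, pvEnumA.eq_def]
      have hle : occmax ≤ occs := by omega
      simp [hle]
  | succ n ih =>
      intro ms occs lastshift rest best hr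
      rw [pvLoopB.eq_def, pvEnumA.eq_def]
      by_cases hle : occmax ≤ occs
      · simp [hle]
      · simp only [hle, if_false]
        by_cases hcut : PySem.List.pyGetD
            (if (ms.length : Int) < PySem.List.pyGetD best occs 0
             then PySem.List.pySetD best occs (ms.length : Int) else best)
            (occs + 1) 0 ≤ (ms.length : Int)
        · simp [hcut]
        · simp only [hcut, if_false]
          rw [PySem.List.pyRange_neg_one_eq_reverse]
          -- foldl-cons of the reversed range prepends the increasing children list
          have hfold : ∀ (l : List Int) (st : List (List Int × Int × Int)),
              (l.reverse.foldl (fun st shift =>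
                  (pvNewMatches cares ms shift, occs + 1, shift) :: st) st)
                = l.map (fun shift => (pvNewMatches cares ms shift, occs + 1, shift)) ++ st := by
            intro l
            induction l with
            | nil => intro st; simp
            | cons a t iht =>
                intro st
                simp [List.foldl_append, iht]
          rw [show (lastshift + q - 1 + 1 : Int) = lastshift + q by ring]
          rw [hfold]
          -- now process the children list left to right
          have hchild : ∀ (shifts : List Int) (b : List Int),
              pvLoopB q occmax cares
                  (shifts.map (fun shift => (pvNewMatches cares ms shift, occs + 1, shift)) ++ rest) b
                = pvLoopB q occmax cares rest
                    (shifts.foldl (fun b shift =>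
                      pvEnumA q occmax cares (pvNewMatches cares ms shift) (occs + 1) shift b) b) := by
            intro shifts
            induction shifts with
            | nil => intro b; simp
            | cons s t iht =>
                intro b
                simp only [List.map_cons, List.cons_append, List.foldl_cons]
                rw [ih (pvNewMatches cares ms s) (occs + 1) s _ b (by omega), iht]
          exact hchild _ _

-- ===== VERDICT (by name: the statement is the Claim_ definition above) =====
theorem min_matching_positions_spec : Claim_equal_min_matching_positions := by
  intro q dontcares occmax _ hpre
  unfold Spec_min_matching_positions min_matching_positions min_matching_positions_alt
  by_cases h0 : occmax = 0
  · simp [h0]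
  · simp only [h0, if_false]
    rw [pvLoop_eq_enum q occmax _ (occmax - 1).toNat _ 1 0 [] _ (by omega)]
    rw [pvLoopB.eq_def]
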